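-- pv_equiv track=rewrite | github.com/Abhi0010/TruthLens | Hackathon/src/social_engineering_detector.py | _generate_safer_rewrite
-- ===== SOURCE A (Python) =====
-- from typing import List
--
-- def _generate_safer_rewrite(original: str, red_flags: List[str]) -> str:
--     """Generate a safer rewrite suggestion based on red flags."""
--     if not red_flags or red_flags[0] == "No obvious scam signals detected":
--         return "Original text appears low-risk. No rewrite needed."
--
--     tips = []
--     if any("urgency" in f.lower() for f in red_flags):
--         tips.append("Remove urgency language—legitimate organizations don't pressure you to act immediately.")
--     if any("authority" in f.lower() for f in red_flags):
--         tips.append("Verify sender through official channels—don't trust contact info in the message.")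
--     if any("credential" in f.lower() or "login" in f.lower() for f in red_flags):
--         tips.append("Never enter passwords via links in messages—go directly to the official site.")
--     if any("money" in f.lower() or "gift" in f.lower() for f in red_flags):
--         tips.append("Legitimate organizations rarely ask for gift cards or wire transfers.")
--     if any("link" in f.lower() for f in red_flags):
--         tips.append("Hover over links to check URLs before clicking—or avoid clicking entirely.")
--
--     return "Safer approach: " + " ".join(tips)
-- ===== SOURCE B (Python) =====
-- from typing import List
--
-- # keyword -> which tip it triggers; 'credential'/'login' share a bit, as do 'money'/'gift'
-- _KEYWORD_BIT = [
--     ("urgency", 0),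
--     ("authority", 1),
--     ("credential", 2),
--     ("login", 2),
--     ("money", 3),
--     ("gift", 3),
--     ("link", 4),
-- ]
--
-- _TIPS = [
--     "Remove urgency language\u2014legitimate organizations don't pressure you to act immediately.",
--     "Verify sender through official channels\u2014don't trust contact info in the message.",
--     "Never enter passwords via links in messages\u2014go directly to the official site.",
--     "Legitimate organizations rarely ask for gift cards or wire transfers.",
--     "Hover over links to check URLs before clicking\u2014or avoid clicking entirely.",
-- ]
--
-- def _generate_safer_rewrite(original: str, red_flags: List[str]) -> str:
--     if not red_flags or red_flags[0] == "No obvious scam signals detected":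
--         return "Original text appears low-risk. No rewrite needed."
--     # single pass over the flags: accumulate a 5-bit mask of triggered tips
--     mask = 0
--     for f in red_flags:
--         low = f.lower()
--         for kw, bit in _KEYWORD_BIT:
--             if kw in low:
--                 mask |= 1 << bit
--     tips = [tip for i, tip in enumerate(_TIPS) if mask >> i & 1]
--     return "Safer approach: " + " ".join(tips)
-- ===== Notes on version B (the rewrite author's own statement) =====
-- stated objective: alternative
-- what changed: Inverts the traversal: instead of A's five tip-branches each rescanning (and re-lowercasing) the whole flag list, B makes a single flag-major pass that lowercases each flag once and accumulates a 5-bit mask of triggered tips via a keyword-to-bit table, then emits the tips whose bit is set.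
import Mathlib
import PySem

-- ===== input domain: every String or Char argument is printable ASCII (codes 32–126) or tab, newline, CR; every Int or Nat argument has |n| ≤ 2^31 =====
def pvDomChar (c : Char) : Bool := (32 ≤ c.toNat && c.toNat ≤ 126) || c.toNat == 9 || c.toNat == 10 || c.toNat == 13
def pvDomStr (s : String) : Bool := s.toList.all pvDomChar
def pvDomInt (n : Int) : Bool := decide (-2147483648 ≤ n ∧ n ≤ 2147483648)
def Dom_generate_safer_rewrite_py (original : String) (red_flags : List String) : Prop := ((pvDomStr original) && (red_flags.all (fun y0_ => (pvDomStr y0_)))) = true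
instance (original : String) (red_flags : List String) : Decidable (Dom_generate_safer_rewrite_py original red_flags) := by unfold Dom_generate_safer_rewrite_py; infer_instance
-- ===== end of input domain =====

-- One honest line: B inverts the traversal — one flag-major pass lowercasing each flag once and
-- accumulating a 5-bit mask via a keyword→bit table, then emits the tips whose bit is set
-- (objective: alternative).

-- ===== PORT A =====
def pvTipUrgency : String := "Remove urgency language—legitimate organizations don't pressure you to act immediately."
def pvTipAuthority : String := "Verify sender through official channels—don't trust contact info in the message."
def pvTipCredential : String := "Never enter passwords via links in messages—go directly to the official site."
def pvTipMoney : String := "Legitimate organizations rarely ask for gift cards or wire transfers."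
def pvTipLink : String := "Hover over links to check URLs before clicking—or avoid clicking entirely."
def pvLowRisk : String := "Original text appears low-risk. No rewrite needed."

def generate_safer_rewrite_py (original : String) (red_flags : List String) : String :=
  match red_flags with
  | [] => pvLowRisk
  | f0 :: _ =>
    if f0 = "No obvious scam signals detected" then pvLowRisk
    else
      let tips : List String := []
      let tips := if red_flags.any (fun f => PySem.Str.isIn "urgency" (PySem.Str.lower f)) then tips ++ [pvTipUrgency] else tips
      let tips := if red_flags.any (fun f => PySem.Str.isIn "authority" (PySem.Str.lower f)) then tips ++ [pvTipAuthority] else tips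
      let tips := if red_flags.any (fun f => PySem.Str.isIn "credential" (PySem.Str.lower f) || PySem.Str.isIn "login" (PySem.Str.lower f)) then tips ++ [pvTipCredential] else tips
      let tips := if red_flags.any (fun f => PySem.Str.isIn "money" (PySem.Str.lower f) || PySem.Str.isIn "gift" (PySem.Str.lower f)) then tips ++ [pvTipMoney] else tips
      let tips := if red_flags.any (fun f => PySem.Str.isIn "link" (PySem.Str.lower f)) then tips ++ [pvTipLink] else tips
      "Safer approach: " ++ PySem.Str.join " " tips

-- ===== PORT B =====
def pvKeywordBit : List (String × Nat) :=
  [("urgency", 0), ("authority", 1), ("credential", 2), ("login", 2),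
   ("money", 3), ("gift", 3), ("link", 4)]

def pvTips : List String :=
  [pvTipUrgency, pvTipAuthority, pvTipCredential, pvTipMoney, pvTipLink]

def generate_safer_rewrite_py_alt (original : String) (red_flags : List String) : String :=
  match red_flags with
  | [] => pvLowRisk
  | f0 :: _ =>
    if f0 = "No obvious scam signals detected" then pvLowRisk
    else
      -- single pass over the flags: accumulate a 5-bit mask of triggered tips
      let mask : Nat := red_flags.foldl (fun m f =>
        let low := PySem.Str.lower f
        pvKeywordBit.foldl (fun m kb => if PySem.Str.isIn kb.1 low then m ||| (1 <<< kb.2) else m) m) 0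
      -- enumerate yields nonnegative indices, so .toNat is exact for 'mask >> i'
      let tips := ((PySem.List.enumerate pvTips).filter
        (fun it => (mask >>> it.1.toNat) &&& 1 != 0)).map (·.2)
      "Safer approach: " ++ PySem.Str.join " " tips

-- ===== PRECONDITION & SPEC =====
def Spec_generate_safer_rewrite_py (original : String) (red_flags : List String) (out : String) : Prop := out = generate_safer_rewrite_py_alt original red_flags
instance (original : String) (red_flags : List String) (out : String) : Decidable (Spec_generate_safer_rewrite_py original red_flags out) := by unfold Spec_generate_safer_rewrite_py; infer_instance

-- ===== CLAIM (what is proved, stated in full; the proofs are below) =====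
def Claim_equal_generate_safer_rewrite_py : Prop := ∀ (original : String) (red_flags : List String), Dom_generate_safer_rewrite_py original red_flags → Spec_generate_safer_rewrite_py original red_flags (generate_safer_rewrite_py original red_flags)

-- ===== LEMMAS AND PROOFS =====

-- the 5-bit value determined by the five tip conditions
def pvVal (b1 b2 b3 b4 b5 : Bool) : Nat :=
  (cond b1 1 0) ||| (cond b2 2 0) ||| (cond b3 4 0) ||| (cond b4 8 0) ||| (cond b5 16 0)

theorem pvVal_lor (a1 a2 a3 a4 a5 c1 c2 c3 c4 c5 : Bool) :
    pvVal a1 a2 a3 a4 a5 ||| pvVal c1 c2 c3 c4 c5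
      = pvVal (a1 || c1) (a2 || c2) (a3 || c3) (a4 || c4) (a5 || c5) := by
  cases a1 <;> cases a2 <;> cases a3 <;> cases a4 <;> cases a5 <;>
    cases c1 <;> cases c2 <;> cases c3 <;> cases c4 <;> cases c5 <;> decide

theorem inner_eq (m : Nat) (low : String) :
    pvKeywordBit.foldl (fun m kb => if PySem.Str.isIn kb.1 low then m ||| (1 <<< kb.2) else m) m
      = m ||| pvVal (PySem.Str.isIn "urgency" low) (PySem.Str.isIn "authority" low)
          (PySem.Str.isIn "credential" low || PySem.Str.isIn "login" low)
          (PySem.Str.isIn "money" low || PySem.Str.isIn "gift" low)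
          (PySem.Str.isIn "link" low) := by
  simp only [pvKeywordBit, List.foldl]
  cases PySem.Str.isIn "urgency" low <;>
  cases PySem.Str.isIn "authority" low <;>
  cases PySem.Str.isIn "credential" low <;>
  cases PySem.Str.isIn "login" low <;>
  cases PySem.Str.isIn "money" low <;>
  cases PySem.Str.isIn "gift" low <;>
  cases PySem.Str.isIn "link" low <;>
    simp [pvVal, Nat.lor_assoc]

theorem mask_eq (l : List String) (m : Nat) :
    l.foldl (fun m f =>
        let low := PySem.Str.lower f
        pvKeywordBit.foldl (fun m kb => if PySem.Str.isIn kb.1 low then m ||| (1 <<< kb.2) else m) m) m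
      = m ||| pvVal
          (l.any (fun f => PySem.Str.isIn "urgency" (PySem.Str.lower f)))
          (l.any (fun f => PySem.Str.isIn "authority" (PySem.Str.lower f)))
          (l.any (fun f => PySem.Str.isIn "credential" (PySem.Str.lower f) || PySem.Str.isIn "login" (PySem.Str.lower f)))
          (l.any (fun f => PySem.Str.isIn "money" (PySem.Str.lower f) || PySem.Str.isIn "gift" (PySem.Str.lower f)))
          (l.any (fun f => PySem.Str.isIn "link" (PySem.Str.lower f))) := by
  induction l generalizing m with
  | nil => simp [pvVal]
  | cons f rest ih =>
    simp only [List.foldl_cons, List.any_cons]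
    rw [inner_eq, ih, Nat.lor_assoc, pvVal_lor]

-- ===== VERDICT (by name: the statement is the Claim_ definition above) =====
theorem generate_safer_rewrite_py_spec : Claim_equal_generate_safer_rewrite_py := by
  intro original red_flags _
  unfold Spec_generate_safer_rewrite_py generate_safer_rewrite_py generate_safer_rewrite_py_alt
  match red_flags with
  | [] => rfl
  | f0 :: rest =>
    by_cases h0 : f0 = "No obvious scam signals detected"
    · simp only [h0, if_true]
    · simp only [h0, if_false]
      rw [mask_eq]
      generalize ((f0 :: rest).any fun f => PySem.Str.isIn "urgency" (PySem.Str.lower f)) = b1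
      generalize ((f0 :: rest).any fun f => PySem.Str.isIn "authority" (PySem.Str.lower f)) = b2
      generalize ((f0 :: rest).any fun f =>
        PySem.Str.isIn "credential" (PySem.Str.lower f) || PySem.Str.isIn "login" (PySem.Str.lower f)) = b3
      generalize ((f0 :: rest).any fun f =>
        PySem.Str.isIn "money" (PySem.Str.lower f) || PySem.Str.isIn "gift" (PySem.Str.lower f)) = b4
      generalize ((f0 :: rest).any fun f => PySem.Str.isIn "link" (PySem.Str.lower f)) = b5
      cases b1 <;> cases b2 <;> cases b3 <;> cases b4 <;> cases b5 <;> rfl
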